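-- pv_equiv track=rewrite | github.com/Gawain27/PubPersister | com/gwngames/persister/utils/StringUtils.py | first_after_fifth
-- ===== SOURCE A (Python) =====
-- def first_after_fifth(text):
--     if not text:
--         return None
--
--     total_chars = len(text.strip())
--     fifth_index = total_chars // 5
--
--     current_index = 0
--     words = text.split()
--     for i, word in enumerate(words):
--         next_index = current_index + len(word)
--         if current_index <= fifth_index < next_index:
--             # Check if the word is shorter than 2 characters
--             if len(word) < 2:
--                 # Return the next word if it exists
--                 return words[i + 1] if i + 1 < len(words) else None
--             return word
--         current_index = next_index + 1
--
--     return None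
-- ===== SOURCE B (Python) =====
-- def first_after_fifth(text):
--     words = text.split()
--     if not words:
--         return None
--     fifth = len(text.strip()) // 5
--     # starts[i] = offset of word i in the single-space-joined word sequence
--     starts = []
--     pos = 0
--     for w in words:
--         starts.append(pos)
--         pos += len(w) + 1
--     # binary search: largest i with starts[i] <= fifth
--     lo, hi = 0, len(starts) - 1
--     while lo < hi:
--         mid = (lo + hi + 1) // 2
--         if starts[mid] <= fifth:
--             lo = mid
--         else:
--             hi = mid - 1
--     w = words[lo]
--     if starts[lo] + len(w) <= fifth:
--         return None  # fifth_index falls in a gap between words or past the last word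
--     if len(w) < 2:
--         return words[lo + 1] if lo + 1 < len(words) else None
--     return w
-- ===== Notes on version B (the rewrite author's own statement) =====
-- stated objective: alternative
-- what changed: B builds the list of cumulative word start-offsets in the single-space-joined word sequence and binary-searches it for the word covering the fifth-fraction position, instead of A's linear scan with a running offset.
import Mathlib
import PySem

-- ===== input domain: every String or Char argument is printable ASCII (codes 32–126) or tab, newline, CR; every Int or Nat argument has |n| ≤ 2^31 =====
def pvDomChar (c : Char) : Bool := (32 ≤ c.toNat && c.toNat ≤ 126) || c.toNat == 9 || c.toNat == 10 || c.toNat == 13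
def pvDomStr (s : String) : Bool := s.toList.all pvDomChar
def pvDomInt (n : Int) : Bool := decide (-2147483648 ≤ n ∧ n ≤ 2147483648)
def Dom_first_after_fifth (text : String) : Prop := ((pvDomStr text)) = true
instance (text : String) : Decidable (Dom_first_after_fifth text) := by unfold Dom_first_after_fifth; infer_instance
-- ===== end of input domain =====

-- B replaces A's linear scan over the words with cumulative word start-offsets plus a
-- hand-written binary search for the word covering the fifth-fraction position
-- (objective: alternative — a different data structure and search, same cost overall).

-- ===== PORT A =====
-- A's for-loop over enumerate(words) with the running offset `cur`.
def faLoop (all : List String) (fifth : Int) : List String → Nat → Int → Option String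
  | [], _, _ => none
  | w :: rest, i, cur =>
    let next := cur + PySem.Str.len w
    if cur ≤ fifth ∧ fifth < next then
      if PySem.Str.len w < 2 then
        if i + 1 < all.length then all[i+1]? else none
      else some w
    else faLoop all fifth rest (i + 1) (next + 1)

def first_after_fifth (text : String) : Option String :=
  if text = "" then none
  else
    let total_chars := PySem.Str.len (PySem.Str.strip text)
    let fifth_index := PySem.Int.floordiv total_chars 5
    let words := PySem.Str.split₀ text
    faLoop words fifth_index words 0 0

-- ===== PORT B =====
-- starts[i] = offset of word i in the single-space-joined word sequence.
def fafStarts : List String → Int → List Int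
  | [], _ => []
  | w :: rest, pos => pos :: fafStarts rest (pos + PySem.Str.len w + 1)

-- `while lo < hi` binary search for the largest index with starts[·] ≤ fifth
-- (mid = (lo + hi + 1) // 2 written inline).
def fafBsearch (starts : List Int) (fifth : Int) (lo hi : Nat) : Nat :=
  if _h : lo < hi then
    if starts.getD ((lo + hi + 1) / 2) 0 ≤ fifth then
      fafBsearch starts fifth ((lo + hi + 1) / 2) hi
    else
      fafBsearch starts fifth lo ((lo + hi + 1) / 2 - 1)
  else lo
termination_by hi - lo
decreasing_by all_goals omega

def first_after_fifth_alt (text : String) : Option String :=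
  match PySem.Str.split₀ text with
  | [] => none
  | _ :: _ =>
    let words := PySem.Str.split₀ text
    let fifth := PySem.Int.floordiv (PySem.Str.len (PySem.Str.strip text)) 5
    let starts := fafStarts words 0
    let lo := fafBsearch starts fifth 0 (starts.length - 1)
    let w := words.getD lo ""
    if starts.getD lo 0 + PySem.Str.len w ≤ fifth then none
    else if PySem.Str.len w < 2 then
      if lo + 1 < words.length then words[lo+1]? else none
    else some w

-- ===== PRECONDITION & SPEC =====
def Spec_first_after_fifth (text : String) (out : Option String) : Prop := out = first_after_fifth_alt text
instance (text : String) (out : Option String) : Decidable (Spec_first_after_fifth text out) := by unfold Spec_first_after_fifth; infer_instance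

-- ===== CLAIM (what is proved, stated in full; the proofs are below) =====
def Claim_equal_first_after_fifth : Prop := ∀ (text : String), Dom_first_after_fifth text → Spec_first_after_fifth text (first_after_fifth text)

-- ===== LEMMAS AND PROOFS =====

-- absolute start offset of word i in the single-space joined sequence
def off : List String → Nat → Int
  | _, 0 => 0
  | [], _ + 1 => 0
  | w :: rest, i + 1 => PySem.Str.len w + 1 + off rest i

-- reference: the word containing relative position f, with the following word
def locate : List String → Int → Option (String × Option String)
  | [], _ => none
  | w :: rest, f =>
    if f < 0 then none
    else if f < PySem.Str.len w then some (w, rest.head?)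
    else locate rest (f - PySem.Str.len w - 1)

def quirkify : Option (String × Option String) → Option String
  | none => none
  | some (w, nxt) => if PySem.Str.len w < 2 then nxt else some w

theorem strlen_nonneg (w : String) : 0 ≤ PySem.Str.len w := by
  simp [PySem.Str.len_eq]

theorem off_nonneg : ∀ (ws : List String) (i : Nat), 0 ≤ off ws i := by
  intro ws
  induction ws with
  | nil => intro i; cases i <;> simp [off]
  | cons w rest ih =>
    intro i
    cases i with
    | zero => simp [off]
    | succ j => have := strlen_nonneg w; have := ih j; simp only [off]; omega

theorem locate_neg (ws : List String) (f : Int) (hf : f < 0) : locate ws f = none := by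
  cases ws with
  | nil => rfl
  | cons w rest => simp [locate, hf]

theorem faLoop_eq_locate (all : List String) (fifth : Int) :
    ∀ (ws : List String) (i : Nat) (cur : Int), all.drop i = ws →
      faLoop all fifth ws i cur = quirkify (locate ws (fifth - cur)) := by
  intro ws
  induction ws with
  | nil => intro i cur _; rfl
  | cons w rest ih =>
    intro i cur hdrop
    have hrest : all.drop (i + 1) = rest := by
      rw [← List.drop_drop (i := 1) (j := i), hdrop]
      rfl
    have hnext : all[i+1]? = rest.head? := by
      rw [List.head?_eq_getElem?, ← hrest, List.getElem?_drop]
    have hw0 : 0 ≤ PySem.Str.len w := strlen_nonneg w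
    by_cases h1 : cur ≤ fifth ∧ fifth < cur + PySem.Str.len w
    · have hc0 : ¬ (fifth - cur < 0) := by omega
      have hc1 : fifth - cur < PySem.Str.len w := by omega
      simp only [faLoop, locate, if_pos h1, if_neg hc0, if_pos hc1, quirkify]
      by_cases hw : PySem.Str.len w < 2
      · rw [if_pos hw, if_pos hw]
        by_cases hin : i + 1 < all.length
        · rw [if_pos hin]; exact hnext
        · rw [if_neg hin, ← hnext, List.getElem?_eq_none (by omega)]
      · rw [if_neg hw, if_neg hw]
    · simp only [faLoop, if_neg h1]
      rw [ih (i + 1) (cur + PySem.Str.len w + 1) hrest]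
      by_cases hc0 : fifth - cur < 0
      · rw [locate_neg rest _ (by omega), locate_neg (w :: rest) _ hc0]
      · have hc1 : ¬ (fifth - cur < PySem.Str.len w) := by omega
        have heq : fifth - (cur + PySem.Str.len w + 1) = fifth - cur - PySem.Str.len w - 1 := by ring
        rw [heq]
        simp only [locate, if_neg hc0, if_neg hc1]

theorem getD_fafStarts : ∀ (ws : List String) (pos : Int) (i : Nat), i < ws.length →
    (fafStarts ws pos).getD i 0 = pos + off ws i := by
  intro ws
  induction ws with
  | nil => intro pos i h; simp at h
  | cons w rest ih =>
    intro pos i h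
    cases i with
    | zero => simp [fafStarts, off]
    | succ j =>
      simp only [fafStarts, List.getD_cons_succ]
      rw [ih (pos + PySem.Str.len w + 1) j (by simpa using h)]
      simp only [off]; ring

theorem length_fafStarts : ∀ (ws : List String) (pos : Int), (fafStarts ws pos).length = ws.length := by
  intro ws
  induction ws with
  | nil => intro pos; rfl
  | cons w rest ih => intro pos; simp [fafStarts, ih]

theorem fafBsearch_spec_fuel (S : List Int) (f : Int) :
    ∀ (n lo hi : Nat), hi - lo ≤ n → lo ≤ hi → S.getD lo 0 ≤ f →
      lo ≤ fafBsearch S f lo hi ∧ fafBsearch S f lo hi ≤ hi ∧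
      S.getD (fafBsearch S f lo hi) 0 ≤ f ∧
      (fafBsearch S f lo hi = hi ∨ f < S.getD (fafBsearch S f lo hi + 1) 0) := by
  intro n
  induction n with
  | zero =>
    intro lo hi hn hle hlo
    rw [fafBsearch, dif_neg (by omega : ¬ lo < hi)]
    exact ⟨le_refl _, hle, hlo, Or.inl (by omega)⟩
  | succ n ih =>
    intro lo hi hn hle hlo
    by_cases hlt : lo < hi
    · rw [fafBsearch, dif_pos hlt]
      by_cases hm : S.getD ((lo + hi + 1) / 2) 0 ≤ f
      · rw [if_pos hm]
        obtain ⟨h1, h2, h3, h4⟩ := ih ((lo + hi + 1) / 2) hi (by omega) (by omega) hm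
        exact ⟨by omega, h2, h3, h4⟩
      · rw [if_neg hm]
        obtain ⟨h1, h2, h3, h4⟩ := ih lo ((lo + hi + 1) / 2 - 1) (by omega) (by omega) hlo
        refine ⟨h1, by omega, h3, ?_⟩
        rcases h4 with h4 | h4
        · right
          have heq : (lo + hi + 1) / 2 - 1 + 1 = (lo + hi + 1) / 2 := by omega
          rw [h4, heq]; omega
        · right; exact h4
    · rw [fafBsearch, dif_neg hlt]
      exact ⟨le_refl _, hle, hlo, Or.inl (by omega)⟩

theorem locate_char : ∀ (ws : List String) (f : Int) (L : Nat), L < ws.length →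
    off ws L ≤ f → (L + 1 = ws.length ∨ f < off ws (L + 1)) →
    locate ws f = (if f < off ws L + PySem.Str.len (ws.getD L "") then
        some (ws.getD L "", ws[L+1]?) else none) := by
  intro ws
  induction ws with
  | nil => intro f L h; simp at h
  | cons w rest ih =>
    intro f L hL hle hub
    cases L with
    | zero =>
      have h0 : ¬ (f < 0) := by have := hle; simp [off] at this; omega
      simp only [off, locate, if_neg h0, List.getD_cons_zero, zero_add]
      by_cases hf : f < PySem.Str.len w
      · have hf' : f < (w.length : Int) := by simpa using hf
        simp [hf', List.head?_eq_getElem?]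
      · rw [if_neg hf, if_neg hf]
        rcases hub with h | h
        · have hnil : rest = [] := by
            cases rest with
            | nil => rfl
            | cons a b => simp at h
          subst hnil; rfl
        · simp only [off] at h ⊢
          exact locate_neg rest _ (by omega)
    | succ L' =>
      have hw0 : 0 ≤ PySem.Str.len w := strlen_nonneg w
      have hoffle : off (w :: rest) (L' + 1) = PySem.Str.len w + 1 + off rest L' := rfl
      have hoff0 : 0 ≤ off rest L' := off_nonneg rest L'
      have h0 : ¬ (f < 0) := by rw [hoffle] at hle; omega
      have h1 : ¬ (f < PySem.Str.len w) := by rw [hoffle] at hle; omega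
      simp only [locate, if_neg h0, if_neg h1, List.getD_cons_succ, List.getElem?_cons_succ]
      rw [ih (f - PySem.Str.len w - 1) L' (by simpa using hL)
        (by rw [hoffle] at hle; omega)
        (by rcases hub with h | h
            · left; simpa using h
            · right; simp only [off] at h; omega)]
      by_cases hc : f - PySem.Str.len w - 1 < off rest L' + PySem.Str.len (rest.getD L' "")
      · rw [if_pos hc, if_pos (by rw [hoffle]; omega)]
      · rw [if_neg hc, if_neg (by rw [hoffle]; omega)]

-- ===== VERDICT (by name: the statement is the Claim_ definition above) =====
theorem first_after_fifth_spec : Claim_equal_first_after_fifth := by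
  unfold Claim_equal_first_after_fifth Spec_first_after_fifth
  intro text _
  by_cases htext : text = ""
  · subst htext; decide
  · rcases hws : PySem.Str.split₀ text with _ | ⟨w, rest⟩
    · simp only [first_after_fifth, first_after_fifth_alt, hws, if_neg htext, faLoop]
    · simp only [first_after_fifth, first_after_fifth_alt, if_neg htext, hws]
      rw [faLoop_eq_locate (w :: rest) _ (w :: rest) 0 0 List.drop_zero, sub_zero]
      set f : Int := PySem.Int.floordiv (PySem.Str.len (PySem.Str.strip text)) 5 with hf
      have hf0 : 0 ≤ f := by
        rw [hf, PySem.Int.floordiv_eq_ediv_of_pos (by norm_num)]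
        exact Int.ediv_nonneg (strlen_nonneg _) (by norm_num)
      have hn : 0 < (w :: rest).length := by simp
      obtain ⟨h1, h2, h3, h4⟩ := fafBsearch_spec_fuel (fafStarts (w :: rest) 0) f
        ((fafStarts (w :: rest) 0).length - 1) 0 ((fafStarts (w :: rest) 0).length - 1)
        (le_refl _) (by omega)
        (by rw [getD_fafStarts (w :: rest) 0 0 hn]; simpa [off] using hf0)
      set r : Nat := fafBsearch (fafStarts (w :: rest) 0) f 0 ((fafStarts (w :: rest) 0).length - 1) with hr
      have hlen : (fafStarts (w :: rest) 0).length = (w :: rest).length := length_fafStarts (w :: rest) 0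
      have hrn : r < (w :: rest).length := by omega
      have hSr : (fafStarts (w :: rest) 0).getD r 0 = off (w :: rest) r := by
        rw [getD_fafStarts (w :: rest) 0 r hrn]; ring
      have hub : r + 1 = (w :: rest).length ∨ f < off (w :: rest) (r + 1) := by
        by_cases hr1 : r + 1 < (w :: rest).length
        · rcases h4 with h4 | h4
          · omega
          · right; rw [getD_fafStarts (w :: rest) 0 (r + 1) hr1, zero_add] at h4; exact h4
        · left; omega
      rw [locate_char (w :: rest) f r hrn (by rw [← hSr]; exact h3) hub, hSr]
      by_cases hc : f < off (w :: rest) r + PySem.Str.len ((w :: rest).getD r "")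
      · rw [if_pos hc, if_neg (by omega), quirkify]
        by_cases hq : PySem.Str.len ((w :: rest).getD r "") < 2
        · rw [if_pos hq, if_pos hq]
          by_cases hin : r + 1 < (w :: rest).length
          · rw [if_pos hin]
          · rw [if_neg hin, List.getElem?_eq_none (by omega)]
        · rw [if_neg hq, if_neg hq]
      · rw [if_neg hc, if_pos (by omega), quirkify]
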